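-- pv_equiv track=rewrite | github.com/HuihanCui/COMP0009 | tableau.py | contradiction_prop
-- ===== SOURCE A (Python) =====
-- def is_literal_prop(fmla):
--     return len(fmla) == 1 or len(fmla) == 2
--
-- def contradiction_prop(fmlas):
--     positives = []
--     negatives = []
--     for fmla in fmlas:
--         if is_literal_prop(fmla):
--             if len(fmla) == 1 and not fmla in negatives:
--                 positives.append(fmla)
--             elif len(fmla) == 2 and not fmla[-1] in positives:
--                 negatives.append(fmla[-1])
--             else:
--                 return False
--     return True
-- ===== SOURCE B (Python) =====
-- def is_literal_prop(fmla):
--     return len(fmla) == 1 or len(fmla) == 2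
--
-- def contradiction_prop(fmlas):
--     positives = {f for f in fmlas if len(f) == 1}
--     negatives = {f[-1] for f in fmlas if len(f) == 2}
--     return positives.isdisjoint(negatives)
-- ===== Notes on version B (the rewrite author's own statement) =====
-- stated objective: simpler
-- what changed: Replaces A's single incremental pass with interleaved membership checks, early return and a 3-way branch by building the two complete literal sets with comprehensions and returning one set-disjointness test; equivalence holds because A's answer only depends on whether the sets intersect.
import Mathlib
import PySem

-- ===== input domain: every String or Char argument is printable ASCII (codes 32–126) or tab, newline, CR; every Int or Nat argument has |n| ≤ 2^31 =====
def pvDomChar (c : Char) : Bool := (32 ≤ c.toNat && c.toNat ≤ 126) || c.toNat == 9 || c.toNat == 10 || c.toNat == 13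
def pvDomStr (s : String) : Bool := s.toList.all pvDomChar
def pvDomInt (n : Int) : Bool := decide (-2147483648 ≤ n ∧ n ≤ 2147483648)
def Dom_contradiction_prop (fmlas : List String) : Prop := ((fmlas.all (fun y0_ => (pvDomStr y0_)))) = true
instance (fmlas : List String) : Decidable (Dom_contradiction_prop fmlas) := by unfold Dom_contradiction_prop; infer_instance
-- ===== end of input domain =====

-- B replaces A's incremental pass (interleaved membership checks, early return, 3-way branch)
-- by building the two complete literal sets and returning one set-disjointness test; objective: simpler.


-- helpers shared by both ports: exactly Python's len(s) and s[-1] as a 1-char string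
-- (s[-1] is only ever evaluated under a len(s) == 2 guard, so the default char is unreachable)
def pvLen (s : String) : Int := PySem.Str.len s
def pvLast (s : String) : String := String.ofList [s.toList.getLastD ' ']

-- ===== PORT A =====
def is_literal_prop (fmla : String) : Bool := pvLen fmla == 1 || pvLen fmla == 2

def contradictionLoop : List String → List String → List String → Bool
  | [], _, _ => true
  | f :: rest, positives, negatives =>
    if is_literal_prop f then
      if pvLen f == 1 && !negatives.contains f then
        contradictionLoop rest (positives ++ [f]) negatives
      else if pvLen f == 2 && !positives.contains (pvLast f) then
        contradictionLoop rest positives (negatives ++ [pvLast f])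
      else false
    else
      contradictionLoop rest positives negatives

def contradiction_prop (fmlas : List String) : Bool := contradictionLoop fmlas [] []

-- ===== PORT B =====
def contradiction_prop_alt (fmlas : List String) : Bool :=
  let positives : PySem.Set String := PySem.Set.ofList (fmlas.filter (fun f => pvLen f == 1))
  let negatives : PySem.Set String := PySem.Set.ofList ((fmlas.filter (fun f => pvLen f == 2)).map pvLast)
  PySem.Set.isdisjoint positives negatives

-- ===== PRECONDITION & SPEC =====
def Spec_contradiction_prop (fmlas : List String) (out : Bool) : Prop := out = contradiction_prop_alt fmlas
instance (fmlas : List String) (out : Bool) : Decidable (Spec_contradiction_prop fmlas out) := by unfold Spec_contradiction_prop; infer_instance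

-- ===== CLAIM (what is proved, stated in full; the proofs are below) =====
def Claim_equal_contradiction_prop : Prop := ∀ (fmlas : List String), Dom_contradiction_prop fmlas → Spec_contradiction_prop fmlas (contradiction_prop fmlas)

-- ===== LEMMAS AND PROOFS =====

-- the positive literals of a list, and the stripped negative literals
def posOf (fmlas : List String) : List String := fmlas.filter (fun f => pvLen f == 1)
def negOf (fmlas : List String) : List String := (fmlas.filter (fun f => pvLen f == 2)).map pvLast

lemma posOf_cons_one {f : String} (rest : List String) (h : pvLen f = 1) :
    posOf (f :: rest) = f :: posOf rest := by simp [posOf, h]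
lemma posOf_cons_ne {f : String} (rest : List String) (h : ¬ pvLen f = 1) :
    posOf (f :: rest) = posOf rest := by simp [posOf, h]
lemma negOf_cons_two {f : String} (rest : List String) (h : pvLen f = 2) :
    negOf (f :: rest) = pvLast f :: negOf rest := by simp [negOf, h]
lemma negOf_cons_ne {f : String} (rest : List String) (h : ¬ pvLen f = 2) :
    negOf (f :: rest) = negOf rest := by simp [negOf, h]

-- characterisation of A's loop: it returns True iff no positive literal (accumulated or
-- still to come) meets a stripped negative literal (accumulated or still to come)
lemma loop_iff (fmlas positives negatives : List String) :
    contradictionLoop fmlas positives negatives = true ↔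
      ((∀ x ∈ posOf fmlas, x ∉ negatives ∧ x ∉ negOf fmlas) ∧
       (∀ y ∈ negOf fmlas, y ∉ positives)) := by
  induction fmlas generalizing positives negatives with
  | nil => simp [contradictionLoop, posOf, negOf]
  | cons f rest ih =>
    by_cases h1 : pvLen f = 1
    · have h2 : ¬ pvLen f = 2 := by omega
      rw [posOf_cons_one rest h1, negOf_cons_ne rest h2]
      by_cases hn : f ∈ negatives
      · have : contradictionLoop (f :: rest) positives negatives = false := by
          simp [contradictionLoop, is_literal_prop, h1, hn]
        simp only [this, Bool.false_eq_true, false_iff, List.forall_mem_cons]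
        tauto
      · have : contradictionLoop (f :: rest) positives negatives
            = contradictionLoop rest (positives ++ [f]) negatives := by
          simp [contradictionLoop, is_literal_prop, h1, hn]
        rw [this, ih]
        simp only [List.forall_mem_cons, List.mem_append, List.mem_singleton, not_or]
        constructor
        · rintro ⟨hP, hN⟩
          exact ⟨⟨⟨hn, fun h => (hN f h).2 rfl⟩, hP⟩, fun y hy => (hN y hy).1⟩
        · rintro ⟨⟨⟨_, hfN⟩, hP⟩, hN⟩
          refine ⟨hP, fun y hy => ⟨hN y hy, fun he => hfN (he ▸ hy)⟩⟩
    · by_cases h2 : pvLen f = 2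
      · rw [posOf_cons_ne rest h1, negOf_cons_two rest h2]
        by_cases hp : pvLast f ∈ positives
        · have : contradictionLoop (f :: rest) positives negatives = false := by
            simp [contradictionLoop, is_literal_prop, h2, hp]
          simp only [this, Bool.false_eq_true, false_iff, List.forall_mem_cons]
          tauto
        · have : contradictionLoop (f :: rest) positives negatives
              = contradictionLoop rest positives (negatives ++ [pvLast f]) := by
            simp [contradictionLoop, is_literal_prop, h2, hp]
          rw [this, ih]
          constructor
          · rintro ⟨hP, hN⟩
            refine ⟨fun x hx => ?_, fun y hy => ?_⟩
            · have h := hP x hx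
              simp only [List.mem_append, List.mem_singleton, not_or] at h
              simp only [List.mem_cons, not_or]
              exact ⟨h.1.1, h.1.2, h.2⟩
            · rcases List.mem_cons.mp hy with h | h
              · exact h ▸ hp
              · exact hN y h
          · rintro ⟨hP, hN⟩
            refine ⟨fun x hx => ?_, fun y hy => hN y (List.mem_cons_of_mem _ hy)⟩
            have h := hP x hx
            simp only [List.mem_cons, not_or] at h
            simp only [List.mem_append, List.mem_singleton, not_or]
            exact ⟨⟨h.1, h.2.1⟩, h.2.2⟩
      · have hnl : ¬ is_literal_prop f = true := by simp [is_literal_prop, h1, h2]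
        rw [posOf_cons_ne rest h1, negOf_cons_ne rest h2,
          show contradictionLoop (f :: rest) positives negatives
            = contradictionLoop rest positives negatives from by
              simp [contradictionLoop, hnl]]
        exact ih positives negatives

-- characterisation of B: the two complete sets are disjoint
lemma alt_iff (fmlas : List String) :
    contradiction_prop_alt fmlas = true ↔ ∀ x ∈ posOf fmlas, x ∉ negOf fmlas := by
  unfold contradiction_prop_alt
  rw [PySem.Set.isdisjoint_iff]
  simp [PySem.Set.mem_ofList, posOf, negOf]

-- ===== VERDICT (by name: the statement is the Claim_ definition above) =====
theorem contradiction_prop_spec : Claim_equal_contradiction_prop := by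
  intro fmlas _
  unfold Spec_contradiction_prop contradiction_prop
  rw [Bool.eq_iff_iff, loop_iff, alt_iff]
  simp
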